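-- pv_equiv track=rewrite | github.com/kristian32/algoritmi-seminarska | L_inf.py | getLowHigh
-- ===== SOURCE A (Python) =====
-- def getLowHigh(xs, dim=0):
--     # Vrne tocko z max vrednostjo v dimenziji dim in z min vrednostjo v tej dimenziji
--     assert len(xs) > 1
--     low = xs[0]
--     high = xs[0]
--     for x in xs:
--         if x[dim] < low[dim]:
--             low = x
--         elif x[dim] > high[dim]:
--             high = x
--     return low, high
-- ===== SOURCE B (Python) =====
-- def getLowHigh(xs, dim=0):
--     # Vrne tocko z max vrednostjo v dimenziji dim in z min vrednostjo v tej dimenziji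
--     assert len(xs) > 1
--     key = lambda x: x[dim]
--     return min(xs, key=key), max(xs, key=key)
-- ===== Notes on version B (the rewrite author's own statement) =====
-- stated objective: idiomatic
-- what changed: Replaces the fused hand-written low/high tracking loop (with its elif coupling) by two independent built-in reductions, min(xs, key) and max(xs, key), whose first-extremal tie-breaking matches the loop's strict comparisons.
import Mathlib
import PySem

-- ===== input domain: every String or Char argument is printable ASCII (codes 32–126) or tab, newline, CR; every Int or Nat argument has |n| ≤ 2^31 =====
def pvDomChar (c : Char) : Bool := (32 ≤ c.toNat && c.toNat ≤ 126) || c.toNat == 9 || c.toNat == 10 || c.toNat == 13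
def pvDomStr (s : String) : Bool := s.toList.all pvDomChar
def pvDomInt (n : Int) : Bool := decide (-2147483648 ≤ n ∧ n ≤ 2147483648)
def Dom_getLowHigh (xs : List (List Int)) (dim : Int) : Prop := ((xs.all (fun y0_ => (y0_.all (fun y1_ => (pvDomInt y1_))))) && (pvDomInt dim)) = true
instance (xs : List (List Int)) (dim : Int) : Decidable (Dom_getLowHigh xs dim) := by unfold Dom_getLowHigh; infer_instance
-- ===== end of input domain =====

-- B replaces A's fused single-loop low/high tracking by two independent built-in reductions
-- (min and max with a key), which is the idiomatic Python for this task; same O(n) cost.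


-- ===== PORT A =====
-- x[dim] is ported as pyGetD (total form of pyGet?); Pre_ restricts to in-range dim,
-- exactly where Python does not raise IndexError.
def getLowHigh (xs : List (List Int)) (dim : Int) : List Int × List Int :=
  let low := PySem.List.pyGetD xs 0 []      -- low = xs[0]
  let high := PySem.List.pyGetD xs 0 []     -- high = xs[0]
  xs.foldl (fun (lh : List Int × List Int) x =>
    if PySem.List.pyGetD x dim 0 < PySem.List.pyGetD lh.1 dim 0 then (x, lh.2)
    else if PySem.List.pyGetD x dim 0 > PySem.List.pyGetD lh.2 dim 0 then (lh.1, x)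
    else lh) (low, high)

-- ===== PORT B =====
def getLowHigh_alt (xs : List (List Int)) (dim : Int) : List Int × List Int :=
  let key := fun (x : List Int) => PySem.List.pyGetD x dim 0
  ((PySem.List.min? xs key).getD [], (PySem.List.max? xs key).getD [])

-- ===== PRECONDITION & SPEC =====
-- Pre_ is exactly where Python A returns: the assert demands len(xs) > 1, and every
-- x[dim] must be in range (else IndexError).
def Pre_getLowHigh (xs : List (List Int)) (dim : Int) : Prop :=
  1 < xs.length ∧ ∀ x ∈ xs, PySem.Raise.InRange x.length dim
instance (xs : List (List Int)) (dim : Int) : Decidable (Pre_getLowHigh xs dim) := by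
  unfold Pre_getLowHigh; infer_instance

def pvWitness_getLowHigh : List (List Int) × Int := ([[3, 1], [0, 5], [2, 2]], 1)

def Spec_getLowHigh (xs : List (List Int)) (dim : Int) (out : List Int × List Int) : Prop := out = getLowHigh_alt xs dim
instance (xs : List (List Int)) (dim : Int) (out : List Int × List Int) : Decidable (Spec_getLowHigh xs dim out) := by unfold Spec_getLowHigh; infer_instance

-- ===== CLAIM (what is proved, stated in full; the proofs are below) =====
def Claim_equal_getLowHigh : Prop := ∀ (xs : List (List Int)) (dim : Int), Dom_getLowHigh xs dim → Pre_getLowHigh xs dim → Spec_getLowHigh xs dim (getLowHigh xs dim)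

-- ===== LEMMAS AND PROOFS =====

-- running first-minimum / first-maximum reductions (the shapes min?/max? fold into)
def foldMin (key : List Int → Int) (m : List Int) (t : List (List Int)) : List Int :=
  t.foldl (fun m x => if key x < key m then x else m) m
def foldMax (key : List Int → Int) (m : List Int) (t : List (List Int)) : List Int :=
  t.foldl (fun m x => if key m < key x then x else m) m

theorem min?_eq_foldMin (key : List Int → Int) (m : List Int) (t : List (List Int)) :
    PySem.List.min? (m :: t) key = some (foldMin key m t) := by
  simp only [PySem.List.min?, List.foldl_cons, foldMin]
  induction t generalizing m with
  | nil => rfl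
  | cons x t ih =>
      simp only [List.foldl_cons]
      by_cases h : key x < key m <;> simp [h, ih]

theorem max?_eq_foldMax (key : List Int → Int) (m : List Int) (t : List (List Int)) :
    PySem.List.max? (m :: t) key = some (foldMax key m t) := by
  simp only [PySem.List.max?, List.foldl_cons, foldMax]
  induction t generalizing m with
  | nil => rfl
  | cons x t ih =>
      simp only [List.foldl_cons]
      by_cases h : key m < key x <;> simp [h, ih]

-- A's fused loop splits into the two independent reductions, given low ≤ high in the key.
theorem foldA_split (key : List Int → Int) (t : List (List Int)) :
    ∀ low high, key low ≤ key high →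
    t.foldl (fun (lh : List Int × List Int) x =>
      if key x < key lh.1 then (x, lh.2)
      else if key x > key lh.2 then (lh.1, x)
      else lh) (low, high) = (foldMin key low t, foldMax key high t) := by
  induction t with
  | nil => intro low high _; rfl
  | cons x t ih =>
      intro low high hle
      simp only [List.foldl_cons, foldMin, foldMax] at *
      by_cases h1 : key x < key low
      · have h2 : ¬ key high < key x := by omega
        have h3 : ¬ key x > key high := by omega
        simp only [h1, if_pos, if_neg h2]
        rw [ih x high (by omega)]
      · by_cases h2 : key x > key high
        · have h3 : ¬ key x < key low := h1
          have h4 : key high < key x := h2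
          simp only [if_neg h1, if_pos h2]
          rw [ih low x (by omega)]
        · simp only [if_neg h1, if_neg h2]
          exact ih low high hle

-- ===== VERDICT (by name: the statement is the Claim_ definition above) =====
theorem getLowHigh_spec : Claim_equal_getLowHigh := by
  intro xs dim _ hpre
  obtain ⟨hlen, -⟩ := hpre
  obtain ⟨h, t, rfl⟩ : ∃ h t, xs = h :: t := by
    cases xs with
    | nil => simp at hlen
    | cons h t => exact ⟨h, t, rfl⟩
  unfold Spec_getLowHigh getLowHigh getLowHigh_alt
  set key := fun (x : List Int) => PySem.List.pyGetD x dim 0 with hkey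
  have h0 : PySem.List.pyGetD (h :: t) 0 ([] : List Int) = h := by
    simp [PySem.List.pyGetD_zero_cons]
  simp only [h0, List.foldl_cons]
  -- first iteration leaves (h, h) unchanged
  have : (if key h < key h then (h, (h : List Int))
          else if key h > key h then (h, h) else ((h, h) : List Int × List Int)) = (h, h) := by
    simp
  rw [this, foldA_split key t h h le_rfl, min?_eq_foldMin key h t, max?_eq_foldMax key h t]
  rfl
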